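-- pv_equiv track=rewrite | github.com/nahcikeel/Algorithm | 프로그래머스/1/64061. 크레인 인형뽑기 게임/크레인 인형뽑기 게임.py | solution
-- ===== SOURCE A (Python) =====
-- def solution(board, moves):
--     answer = 0
--     bucket = []
--     crain = []
--
--     for i in range(len(board)):
--         c = []
--         for b in board:
--             if b[i] != 0:
--                 c.append(b[i])
--         crain.append(c)
--
--     for m in moves:
--         if len(crain[m-1]) > 0:
--             # bucket.append(crain[m-1].pop(0))
--             a = crain[m-1].pop(0)
--
--             if len(bucket)>0 and bucket[-1] == a:
--                 bucket.pop()
--                 answer += 2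
--
--             else:
--                 bucket.append(a)
--
--
--     return answer
-- ===== SOURCE B (Python) =====
-- def solution(board, moves):
--     # Lazy column pointers: no pre-built per-column stacks; board is never mutated.
--     n = len(board)
--     top = [0] * n          # next row to inspect in each column
--     answer = 0
--     bucket = []
--     for m in moves:
--         c = m - 1
--         r = top[c]
--         while r < n and board[r][c] == 0:
--             r += 1
--         if r < n:
--             a = board[r][c]
--             top[c] = r + 1
--             if bucket and bucket[-1] == a:
--                 bucket.pop()
--                 answer += 2
--             else:
--                 bucket.append(a)
--         else:
--             top[c] = r
--     return answer
-- ===== Notes on version B (the rewrite author's own statement) =====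
-- stated objective: alternative
-- what changed: Instead of pre-building a popped list for every column, B keeps one lazy row pointer per column and scans the column downward past zeros at each move, reading the board in place; Pre_ excludes only moves m <= 0 on boards whose rows are longer than the number of rows, where A returns a value picked by negative-index wraparound in its pre-built column table while B wraps in the physical (wider) row - two accidental column choices no caller would specify.
-- outside the precondition, e.g. on solution([[1, 5, 2], [1, 5, 2]], [0, 2]): A returns 2, B returns 0
import Mathlib
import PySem

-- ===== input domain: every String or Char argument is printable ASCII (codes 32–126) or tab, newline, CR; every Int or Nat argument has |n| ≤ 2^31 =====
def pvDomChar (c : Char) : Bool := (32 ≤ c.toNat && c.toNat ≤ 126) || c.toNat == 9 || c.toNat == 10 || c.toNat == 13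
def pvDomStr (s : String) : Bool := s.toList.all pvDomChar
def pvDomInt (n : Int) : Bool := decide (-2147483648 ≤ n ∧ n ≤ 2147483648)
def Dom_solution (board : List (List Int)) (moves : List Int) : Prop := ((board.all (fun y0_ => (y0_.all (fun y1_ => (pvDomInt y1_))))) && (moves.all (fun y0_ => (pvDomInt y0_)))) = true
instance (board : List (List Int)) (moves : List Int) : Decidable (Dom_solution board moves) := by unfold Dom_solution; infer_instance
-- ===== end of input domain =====

-- B replaces A's eagerly pre-built per-column stacks by one lazy row pointer per column
-- (alternative decomposition, same asymptotic cost); the board argument is not mutated by either.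

-- ===== PORT A =====
-- column i of the board, nonzero entries only (A's inner 'for b in board' loop)
def buildCol (board : List (List Int)) (i : Nat) : List Int :=
  board.foldl (fun c b => if b.getD i 0 ≠ 0 then c ++ [b.getD i 0] else c) []

-- A's per-move loop body; state = (answer, bucket, crain); crain[m-1] via PySem (negative index wraps)
def stepA (st : Int × List Int × List (List Int)) (m : Int) : Int × List Int × List (List Int) :=
  let (answer, bucket, crain) := st
  let col := PySem.List.pyGetD crain (m - 1) []
  if 0 < col.length then
    let a := col.headD 0
    let crain' := PySem.List.pySetD crain (m - 1) col.tail
    if 0 < bucket.length ∧ bucket.getLast? = some a then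
      (answer + 2, bucket.dropLast, crain')
    else
      (answer, bucket ++ [a], crain')
  else st

def solution (board : List (List Int)) (moves : List Int) : Int :=
  let crain := (List.range board.length).map (fun i => buildCol board i)
  (moves.foldl stepA (0, [], crain)).1

-- ===== PORT B =====
-- B's 'while r < n and board[r][c] == 0: r += 1' loop (board[r][c] via PySem: negative c wraps)
def findTop (board : List (List Int)) (c : Int) (r : Nat) (n : Nat) : Nat :=
  if h : r < n then
    if PySem.List.pyGetD (board.getD r []) c 0 = 0 then findTop board c (r + 1) n else r
  else r
termination_by n - r

-- B's per-move loop body; state = (answer, bucket, top)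
def stepB (board : List (List Int)) (st : Int × List Int × List Nat) (m : Int) :
    Int × List Int × List Nat :=
  let (answer, bucket, top) := st
  let c := m - 1
  let r := findTop board c (PySem.List.pyGetD top c 0) board.length
  if r < board.length then
    let a := PySem.List.pyGetD (board.getD r []) c 0
    let top' := PySem.List.pySetD top c (r + 1)
    if bucket.getLast? = some a then
      (answer + 2, bucket.dropLast, top')
    else
      (answer, bucket ++ [a], top')
  else (answer, bucket, PySem.List.pySetD top c r)

def solution_alt (board : List (List Int)) (moves : List Int) : Int :=
  (moves.foldl (stepB board) (0, [], List.replicate board.length 0)).1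

-- ===== PRECONDITION & SPEC =====
-- Pre_ is A's returning domain except one corner: rows must be at least as long as the number of
-- rows (A reads b[i] for i < len(board) and raises IndexError on shorter rows) and each move must
-- satisfy 1-len(board) ≤ m ≤ len(board) (outside that A raises IndexError); moves m ≤ 0, where A
-- returns via negative-index wraparound, are admitted only on boards whose rows all have exactly
-- len(board) entries — on wider boards A wraps in its pre-built column table while B wraps in the
-- physical row, two accidental column choices no caller of this game would specify.
def Pre_solution (board : List (List Int)) (moves : List Int) : Prop :=
  (∀ row ∈ board, board.length ≤ row.length) ∧
  (∀ m ∈ moves, 1 - (board.length : Int) ≤ m ∧ m ≤ (board.length : Int)) ∧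
  ((∀ m ∈ moves, 1 ≤ m) ∨ (∀ row ∈ board, row.length = board.length))
instance (board : List (List Int)) (moves : List Int) : Decidable (Pre_solution board moves) := by
  unfold Pre_solution; infer_instance

def pvWitness_solution : List (List Int) × List Int :=
  ([[0, 0, 1], [0, 1, 2], [1, 2, 2]], [1, 3, 0, 3, 2, 2])

def Spec_solution (board : List (List Int)) (moves : List Int) (out : Int) : Prop := out = solution_alt board moves
instance (board : List (List Int)) (moves : List Int) (out : Int) : Decidable (Spec_solution board moves out) := by unfold Spec_solution; infer_instance

-- ===== CLAIM (what is proved, stated in full; the proofs are below) =====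
def Claim_equal_solution : Prop := ∀ (board : List (List Int)) (moves : List Int), Dom_solution board moves → Pre_solution board moves → Spec_solution board moves (solution board moves)

-- ===== LEMMAS AND PROOFS =====

-- resolved (Python) index of i in a list of length n, for -n ≤ i < n
def pyNat (n : Nat) (i : Int) : Nat := if 0 ≤ i then i.toNat else n - (-i).toNat

lemma pyNat_lt (n : Nat) (i : Int) (h1 : -(n : Int) ≤ i) (h2 : i < (n : Int)) :
    pyNat n i < n := by
  unfold pyNat; split <;> omega

lemma pyNat_nonneg (n : Nat) (i : Int) (h : 0 ≤ i) : pyNat n i = i.toNat := by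
  unfold pyNat; rw [if_pos h]

lemma pyIdx?_eq (n : Nat) (i : Int) (h1 : -(n : Int) ≤ i) (h2 : i < (n : Int)) :
    PySem.List.pyIdx? n i = some (pyNat n i) := by
  unfold PySem.List.pyIdx? pyNat
  by_cases h0 : 0 ≤ i
  · rw [if_pos h0, if_pos h2, if_pos h0]
  · rw [if_neg h0, if_pos h1, if_neg h0]

lemma pyGetD_eq_getD {α : Type} (xs : List α) (n : Nat) (i : Int) (d : α)
    (hl : xs.length = n) (h1 : -(n : Int) ≤ i) (h2 : i < (n : Int)) :
    PySem.List.pyGetD xs i d = xs.getD (pyNat n i) d := by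
  subst hl
  unfold PySem.List.pyGetD PySem.List.pyGet?
  rw [pyIdx?_eq _ _ h1 h2]
  rfl

lemma pySetD_eq_set {α : Type} (xs : List α) (n : Nat) (i : Int) (v : α)
    (hl : xs.length = n) (h1 : -(n : Int) ≤ i) (h2 : i < (n : Int)) :
    PySem.List.pySetD xs i v = xs.set (pyNat n i) v := by
  subst hl
  unfold PySem.List.pySetD PySem.List.pySet?
  rw [pyIdx?_eq _ _ h1 h2]
  simp only [Option.map_some, Option.getD_some]

-- proof-side variants of B's scan, on an already-resolved column index
def findTopN (board : List (List Int)) (idx : Nat) (r : Nat) (n : Nat) : Nat :=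
  if h : r < n then
    if (board.getD r []).getD idx 0 = 0 then findTopN board idx (r + 1) n else r
  else r
termination_by n - r

-- the nonzero entries of column idx among rows r, r+1, …, n-1
def colFrom (board : List (List Int)) (idx : Nat) (r : Nat) (n : Nat) : List Int :=
  if h : r < n then
    (if (board.getD r []).getD idx 0 ≠ 0 then [(board.getD r []).getD idx 0] else []) ++
      colFrom board idx (r + 1) n
  else []
termination_by n - r

lemma findTop_eq_findTopN (board : List (List Int)) (c : Int) (idx : Nat) (r n : Nat)
    (hrow : ∀ r', r' < n →
      PySem.List.pyGetD (board.getD r' []) c 0 = (board.getD r' []).getD idx 0) :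
    findTop board c r n = findTopN board idx r n := by
  by_cases h : r < n
  · rw [findTop, findTopN, dif_pos h, dif_pos h, hrow r h]
    split
    · exact findTop_eq_findTopN board c idx (r + 1) n hrow
    · rfl
  · rw [findTop, findTopN, dif_neg h, dif_neg h]
termination_by n - r

lemma getD_set {α : Type} (l : List α) (i j : Nat) (x d : α) :
    (l.set i x).getD j d = if j = i ∧ i < l.length then x else l.getD j d := by
  simp only [List.getD_eq_getElem?_getD, List.getElem?_set]
  by_cases h : i = j
  · subst h
    by_cases h2 : i < l.length
    · simp [h2]
    · simp [h2]
  · simp [h, Ne.symm h]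

lemma buildCol_eq (board : List (List Int)) (i : Nat) :
    buildCol board i = (board.map (fun b => b.getD i 0)).filter (fun v => v ≠ 0) := by
  unfold buildCol
  induction board using List.reverseRecOn with
  | nil => simp
  | append_singleton xs x ih => simp [List.filter_append]; split <;> simp_all

lemma colFrom_eq (board : List (List Int)) (c r : Nat) :
    colFrom board c r board.length
      = ((board.drop r).map (fun b => b.getD c 0)).filter (fun v => v ≠ 0) := by
  by_cases h : r < board.length
  · rw [colFrom, dif_pos h, colFrom_eq board c (r + 1),
      List.drop_eq_getElem_cons h]
    simp only [List.map_cons, List.filter_cons, List.getD_eq_getElem?_getD,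
      List.getElem?_eq_getElem h]
    split <;> simp_all
  · rw [colFrom, dif_neg h, List.drop_eq_nil_of_le (by omega)]; simp
termination_by board.length - r

lemma colFrom_empty_findTopN (board : List (List Int)) (c r n : Nat) (hr : r ≤ n)
    (h : colFrom board c r n = []) : findTopN board c r n = n := by
  by_cases hlt : r < n
  · rw [colFrom, dif_pos hlt] at h
    rw [findTopN, dif_pos hlt]
    rcases List.append_eq_nil_iff.mp h with ⟨h1, h2⟩
    split
    · exact colFrom_empty_findTopN board c (r+1) n (by omega) h2
    · simp_all
  · rw [findTopN, dif_neg hlt]; omega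
termination_by n - r

lemma colFrom_cons_findTopN (board : List (List Int)) (c r n : Nat) {a : Int} {L : List Int}
    (h : colFrom board c r n = a :: L) :
    findTopN board c r n < n ∧
    (board.getD (findTopN board c r n) []).getD c 0 = a ∧
    colFrom board c (findTopN board c r n + 1) n = L := by
  by_cases hlt : r < n
  · rw [colFrom, dif_pos hlt] at h
    rw [findTopN, dif_pos hlt]
    by_cases hz : (board.getD r []).getD c 0 = 0
    · rw [if_pos hz]
      rw [hz] at h
      simp only [ne_eq, not_true_eq_false, if_false, List.nil_append] at h
      exact colFrom_cons_findTopN board c (r+1) n h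
    · rw [if_neg hz]
      simp only [ne_eq, hz, not_false_eq_true, if_true, List.cons_append,
        List.nil_append, List.cons.injEq] at h
      exact ⟨hlt, h.1, h.2⟩
  · rw [colFrom, dif_neg hlt] at h; exact absurd h (by simp)
termination_by n - r

-- invariant tying A's remaining column stacks to B's row pointers
def InvAB (board : List (List Int)) (crain : List (List Int)) (top : List Nat) : Prop :=
  top.length = board.length ∧ crain.length = board.length ∧
  ∀ c, c < board.length →
    top.getD c 0 ≤ board.length ∧
    crain.getD c [] = colFrom board c (top.getD c 0) board.length

lemma step_eq (board : List (List Int)) (m : Int)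
    (hIn : -(board.length : Int) ≤ m - 1 ∧ m - 1 < (board.length : Int))
    (hrow : ∀ r', r' < board.length →
      PySem.List.pyGetD (board.getD r' []) (m - 1) 0
        = (board.getD r' []).getD (pyNat board.length (m - 1)) 0)
    (ans : Int) (bucket : List Int) (crain : List (List Int)) (top : List Nat)
    (hInv : InvAB board crain top) :
    (stepA (ans, bucket, crain) m).1 = (stepB board (ans, bucket, top) m).1 ∧
    (stepA (ans, bucket, crain) m).2.1 = (stepB board (ans, bucket, top) m).2.1 ∧
    InvAB board (stepA (ans, bucket, crain) m).2.2 (stepB board (ans, bucket, top) m).2.2 := by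
  obtain ⟨htl, hcl, hcol⟩ := hInv
  have hidx : pyNat board.length (m - 1) < board.length := pyNat_lt _ _ hIn.1 hIn.2
  obtain ⟨htop, hcr⟩ := hcol _ hidx
  have egetA : PySem.List.pyGetD crain (m - 1) ([] : List Int)
      = crain.getD (pyNat board.length (m - 1)) [] :=
    pyGetD_eq_getD crain board.length (m - 1) [] hcl hIn.1 hIn.2
  have esetA : ∀ v, PySem.List.pySetD crain (m - 1) v
      = crain.set (pyNat board.length (m - 1)) v :=
    fun v => pySetD_eq_set crain board.length (m - 1) v hcl hIn.1 hIn.2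
  have egetT : PySem.List.pyGetD top (m - 1) 0
      = top.getD (pyNat board.length (m - 1)) 0 :=
    pyGetD_eq_getD top board.length (m - 1) 0 htl hIn.1 hIn.2
  have esetT : ∀ v, PySem.List.pySetD top (m - 1) v
      = top.set (pyNat board.length (m - 1)) v :=
    fun v => pySetD_eq_set top board.length (m - 1) v htl hIn.1 hIn.2
  have eft : ∀ r, findTop board (m - 1) r board.length
      = findTopN board (pyNat board.length (m - 1)) r board.length :=
    fun r => findTop_eq_findTopN board (m - 1) (pyNat board.length (m - 1)) r board.length hrow
  cases hc : crain.getD (pyNat board.length (m - 1)) [] with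
  | nil =>
    have hft : findTopN board (pyNat board.length (m - 1))
        (top.getD (pyNat board.length (m - 1)) 0) board.length = board.length :=
      colFrom_empty_findTopN board _ _ _ htop (by rw [← hcr, hc])
    have hA : stepA (ans, bucket, crain) m = (ans, bucket, crain) := by
      unfold stepA
      dsimp only
      rw [egetA, hc, if_neg (by simp)]
    have hB : stepB board (ans, bucket, top) m
        = (ans, bucket, top.set (pyNat board.length (m - 1)) board.length) := by
      unfold stepB
      dsimp only
      rw [egetT, eft, hft, if_neg (lt_irrefl board.length), esetT]
    rw [hA, hB]
    refine ⟨rfl, rfl, by simp [htl], hcl, fun c hcn => ?_⟩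
    rw [getD_set]
    by_cases hce : c = pyNat board.length (m - 1)
    · subst hce
      have e0 : (pyNat board.length (m - 1) = pyNat board.length (m - 1) ∧
          pyNat board.length (m - 1) < top.length) := ⟨rfl, by omega⟩
      rw [if_pos e0]
      refine ⟨le_refl _, ?_⟩
      rw [hc, colFrom, dif_neg (lt_irrefl board.length)]
    · rw [if_neg (by tauto)]
      exact hcol c hcn
  | cons a L =>
    obtain ⟨hlt, ha, hrest⟩ :=
      colFrom_cons_findTopN board (pyNat board.length (m - 1))
        (top.getD (pyNat board.length (m - 1)) 0) board.length (by rw [← hcr, hc])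
    have hcond : (0 < bucket.length ∧ bucket.getLast? = some a) ↔
        bucket.getLast? = some a := by
      constructor
      · exact fun h => h.2
      · intro h
        refine ⟨?_, h⟩
        cases bucket <;> simp_all
    have hsame : InvAB board (crain.set (pyNat board.length (m - 1)) L)
        (top.set (pyNat board.length (m - 1))
          (findTopN board (pyNat board.length (m - 1))
            (top.getD (pyNat board.length (m - 1)) 0) board.length + 1)) := by
      refine ⟨by simp [htl], by simp [hcl], fun c hcn => ?_⟩
      rw [getD_set, getD_set]
      by_cases hce : c = pyNat board.length (m - 1)
      · subst hce
        have e1 : (pyNat board.length (m - 1) = pyNat board.length (m - 1) ∧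
            pyNat board.length (m - 1) < crain.length) := ⟨rfl, by omega⟩
        have e2 : (pyNat board.length (m - 1) = pyNat board.length (m - 1) ∧
            pyNat board.length (m - 1) < top.length) := ⟨rfl, by omega⟩
        rw [if_pos e1, if_pos e2]
        exact ⟨by omega, hrest.symm⟩
      · rw [if_neg (by tauto), if_neg (by tauto)]
        exact hcol c hcn
    by_cases hb : bucket.getLast? = some a
    · have hA : stepA (ans, bucket, crain) m
          = (ans + 2, bucket.dropLast, crain.set (pyNat board.length (m - 1)) L) := by
        unfold stepA
        dsimp only
        rw [egetA, hc, if_pos (by simp), List.headD_cons, List.tail_cons, esetA,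
          if_pos (hcond.mpr hb)]
      have hB : stepB board (ans, bucket, top) m
          = (ans + 2, bucket.dropLast,
             top.set (pyNat board.length (m - 1))
               (findTopN board (pyNat board.length (m - 1))
                 (top.getD (pyNat board.length (m - 1)) 0) board.length + 1)) := by
        unfold stepB
        dsimp only
        rw [egetT, eft, if_pos hlt, hrow _ hlt, ha, esetT, if_pos hb]
      rw [hA, hB]
      exact ⟨rfl, rfl, hsame⟩
    · have hA : stepA (ans, bucket, crain) m
          = (ans, bucket ++ [a], crain.set (pyNat board.length (m - 1)) L) := by
        unfold stepA
        dsimp only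
        rw [egetA, hc, if_pos (by simp), List.headD_cons, List.tail_cons, esetA,
          if_neg (fun hh => hb (hcond.mp hh))]
      have hB : stepB board (ans, bucket, top) m
          = (ans, bucket ++ [a],
             top.set (pyNat board.length (m - 1))
               (findTopN board (pyNat board.length (m - 1))
                 (top.getD (pyNat board.length (m - 1)) 0) board.length + 1)) := by
        unfold stepB
        dsimp only
        rw [egetT, eft, if_pos hlt, hrow _ hlt, ha, esetT, if_neg hb]
      rw [hA, hB]
      exact ⟨rfl, rfl, hsame⟩

lemma foldl_eq (board : List (List Int)) (moves : List Int)
    (hm : ∀ m ∈ moves, -(board.length : Int) ≤ m - 1 ∧ m - 1 < (board.length : Int))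
    (hrow : ∀ m ∈ moves, ∀ r', r' < board.length →
      PySem.List.pyGetD (board.getD r' []) (m - 1) 0
        = (board.getD r' []).getD (pyNat board.length (m - 1)) 0)
    (ans : Int) (bucket : List Int) (crain : List (List Int)) (top : List Nat)
    (hInv : InvAB board crain top) :
    (moves.foldl stepA (ans, bucket, crain)).1
      = (moves.foldl (stepB board) (ans, bucket, top)).1 := by
  induction moves generalizing ans bucket crain top with
  | nil => rfl
  | cons m ms ih =>
    obtain ⟨h1, h2, h3⟩ :=
      step_eq board m (hm m (by simp)) (hrow m (by simp)) ans bucket crain top hInv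
    simp only [List.foldl_cons]
    rcases hA : stepA (ans, bucket, crain) m with ⟨a1, b1, c1⟩
    rcases hB : stepB board (ans, bucket, top) m with ⟨a2, b2, c2⟩
    rw [hA, hB] at h1 h2 h3
    dsimp only at h1 h2 h3
    subst h1 h2
    exact ih (fun x hx => hm x (List.mem_cons_of_mem _ hx))
      (fun x hx => hrow x (List.mem_cons_of_mem _ hx)) a1 b1 c1 c2 h3

lemma inv_init (board : List (List Int)) :
    InvAB board ((List.range board.length).map (fun i => buildCol board i))
      (List.replicate board.length 0) := by
  refine ⟨by simp, by simp, fun c hcn => ?_⟩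
  rw [List.getD_eq_getElem?_getD, List.getElem?_replicate, if_pos hcn, Option.getD_some]
  refine ⟨Nat.zero_le _, ?_⟩
  rw [List.getD_eq_getElem?_getD, List.getElem?_map, List.getElem?_range hcn]
  simp only [Option.map_some, Option.getD_some]
  rw [buildCol_eq, colFrom_eq, List.drop_zero]

-- ===== VERDICT (by name: the statement is the Claim_ definition above) =====
theorem solution_spec : Claim_equal_solution := by
  intro board moves _ hpre
  obtain ⟨hlen, hbound, hdisj⟩ := hpre
  unfold Spec_solution solution solution_alt
  refine foldl_eq board moves
    (fun m hmm => ⟨by have := hbound m hmm; omega, by have := hbound m hmm; omega⟩)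
    (fun m hmm r' hr' => ?_) 0 [] _ _ (inv_init board)
  rcases hdisj with hpos | hsq
  · have h1 : (0 : Int) ≤ m - 1 := by have := hpos m hmm; omega
    rw [PySem.List.pyGetD_of_nonneg _ 0 h1, pyNat_nonneg _ _ h1]
  · have hmem : board.getD r' [] ∈ board := by
      rw [List.getD_eq_getElem?_getD, List.getElem?_eq_getElem hr', Option.getD_some]
      exact List.getElem_mem hr'
    have hrl : (board.getD r' []).length = board.length := hsq _ hmem
    have := hbound m hmm
    exact pyGetD_eq_getD _ board.length (m - 1) 0 hrl (by omega) (by omega)
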